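-- pv_equiv track=rewrite | github.com/neoCheck/advent_of_code | 2023/15/day_15.py | get_hash_result
-- ===== SOURCE A (Python) =====
-- def get_hash_result(string: str) -> int:
--     current_value = 0
--     for c in string:
--         ascii_code = ord(c)
--         current_value += ascii_code
--         current_value *= 17
--         current_value = current_value % 256
--
--     return current_value
-- ===== SOURCE B (Python) =====
-- def get_hash_result(string: str) -> int:
--     # closed form: each character's contribution is ord(c) * 17^(distance to end), summed mod 256
--     n = len(string)
--     return sum(ord(c) * pow(17, n - i, 256) for i, c in enumerate(string)) % 256
-- ===== Notes on version B (the rewrite author's own statement) =====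
-- stated objective: alternative
-- what changed: Replaces the sequential accumulator loop (add, *17, mod each step) by a closed-form modular sum: each character contributes ord(c)*17^(n-i) mod 256, summed independently and reduced once.
import Mathlib
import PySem

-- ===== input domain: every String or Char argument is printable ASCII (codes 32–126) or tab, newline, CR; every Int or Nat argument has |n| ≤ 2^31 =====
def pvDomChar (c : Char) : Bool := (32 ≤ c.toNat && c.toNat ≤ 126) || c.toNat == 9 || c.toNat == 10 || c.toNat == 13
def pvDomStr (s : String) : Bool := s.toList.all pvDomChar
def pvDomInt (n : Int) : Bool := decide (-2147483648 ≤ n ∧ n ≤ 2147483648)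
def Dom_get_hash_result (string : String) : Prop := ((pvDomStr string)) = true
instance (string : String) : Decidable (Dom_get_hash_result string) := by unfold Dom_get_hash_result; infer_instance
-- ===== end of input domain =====

-- B replaces A's sequential accumulator loop by a closed-form modular sum of per-character
-- contributions ord(c)*17^(n-i) mod 256 (objective: alternative algorithm, same cost class).

-- ===== PORT A =====
def get_hash_result (string : String) : Int :=
  string.toList.foldl
    (fun current_value c =>
      let ascii_code : Int := c.toNat
      PySem.Int.mod ((current_value + ascii_code) * 17) 256)
    0

-- ===== PORT B =====
def get_hash_result_alt (string : String) : Int :=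
  let n : Int := PySem.Str.len string
  PySem.Int.mod
    (((PySem.List.enumerate string.toList 0).map
        (fun p => (p.2.toNat : Int) * (PySem.Int.mod ((17 : Int) ^ (n - p.1).toNat) 256))).sum)
    256

-- ===== PRECONDITION & SPEC =====
def Spec_get_hash_result (string : String) (out : Int) : Prop := out = get_hash_result_alt string
instance (string : String) (out : Int) : Decidable (Spec_get_hash_result string out) := by unfold Spec_get_hash_result; infer_instance

-- ===== CLAIM (what is proved, stated in full; the proofs are below) =====
def Claim_equal_get_hash_result : Prop := ∀ (string : String), Dom_get_hash_result string → Spec_get_hash_result string (get_hash_result string)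

-- ===== LEMMAS AND PROOFS =====

-- exact (un-reduced) per-character contribution sum
def pvHsum : List Char → Int
  | [] => 0
  | c :: t => (c.toNat : Int) * 17 ^ (t.length + 1) + pvHsum t

theorem pvModEq_self (x : Int) : Int.ModEq 256 (x % 256) x :=
  Int.emod_emod_of_dvd x dvd_rfl

theorem pvFoldl_eq_hsum (l : List Char) :
    ∀ a : Int, 0 ≤ a → a < 256 →
      l.foldl (fun cv c => PySem.Int.mod ((cv + (c.toNat : Int)) * 17) 256) a
        = (a * 17 ^ l.length + pvHsum l) % 256 := by
  induction l with
  | nil =>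
      intro a h0 h1
      simp [pvHsum, Int.emod_eq_of_lt h0 h1]
  | cons c t ih =>
      intro a h0 h1
      have hmod : PySem.Int.mod ((a + (c.toNat : Int)) * 17) 256
          = ((a + (c.toNat : Int)) * 17) % 256 :=
        PySem.Int.mod_eq_emod_of_pos (by norm_num)
      have h0' : 0 ≤ ((a + (c.toNat : Int)) * 17) % 256 := Int.emod_nonneg _ (by norm_num)
      have h1' : ((a + (c.toNat : Int)) * 17) % 256 < 256 := Int.emod_lt_of_pos _ (by norm_num)
      simp only [List.foldl_cons, hmod]
      rw [ih _ h0' h1']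
      have h2 : (((a + (c.toNat : Int)) * 17) % 256 * 17 ^ t.length + pvHsum t) % 256
          = ((a + (c.toNat : Int)) * 17 * 17 ^ t.length + pvHsum t) % 256 :=
        Int.ModEq.add_right _ (Int.ModEq.mul_right _ (pvModEq_self _))
      rw [h2]
      have h3 : (a + (c.toNat : Int)) * 17 * 17 ^ t.length + pvHsum t
          = a * 17 ^ (c :: t).length + pvHsum (c :: t) := by
        simp only [pvHsum, List.length_cons, pow_succ]
        ring
      rw [h3]

theorem pvEnumSum_hsum (l : List Char) :
    ∀ (s N : Int), N = s + l.length →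
      ((PySem.List.enumerate l s).map
          (fun p => (p.2.toNat : Int) * (PySem.Int.mod ((17 : Int) ^ (N - p.1).toNat) 256))).sum % 256
        = pvHsum l % 256 := by
  induction l with
  | nil => intro s N _; simp [pvHsum, PySem.List.enumerate]
  | cons c t ih =>
      intro s N hN
      rw [PySem.List.enumerate_cons]
      have hlc : N = s + ((t.length : Int) + 1) := by
        rw [hN]; push_cast [List.length_cons]; ring
      have hexp : (N - s).toNat = t.length + 1 := by omega
      have hmod : PySem.Int.mod ((17 : Int) ^ (t.length + 1)) 256
          = ((17 : Int) ^ (t.length + 1)) % 256 :=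
        PySem.Int.mod_eq_emod_of_pos (by norm_num)
      have hIH : Int.ModEq 256
          (((PySem.List.enumerate t (s + 1)).map
              (fun p => (p.2.toNat : Int) * (PySem.Int.mod ((17 : Int) ^ (N - p.1).toNat) 256))).sum)
          (pvHsum t) :=
        ih (s + 1) N (by omega)
      simp only [List.map_cons, List.sum_cons, hexp, hmod]
      have hstep : Int.ModEq 256
          ((c.toNat : Int) * ((17 : Int) ^ (t.length + 1) % 256)
              + ((PySem.List.enumerate t (s + 1)).map
                  (fun p => (p.2.toNat : Int) * (PySem.Int.mod ((17 : Int) ^ (N - p.1).toNat) 256))).sum)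
          ((c.toNat : Int) * (17 : Int) ^ (t.length + 1) + pvHsum t) :=
        Int.ModEq.add (Int.ModEq.mul_left _ (pvModEq_self _)) hIH
      rw [pvHsum]
      exact hstep

-- ===== VERDICT (by name: the statement is the Claim_ definition above) =====
theorem get_hash_result_spec : Claim_equal_get_hash_result := by
  intro string _
  unfold Spec_get_hash_result
  have hA : get_hash_result string
      = (0 * 17 ^ string.toList.length + pvHsum string.toList) % 256 := by
    unfold get_hash_result
    exact pvFoldl_eq_hsum string.toList 0 le_rfl (by norm_num)
  have hB : get_hash_result_alt string = pvHsum string.toList % 256 := by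
    unfold get_hash_result_alt
    show PySem.Int.mod
        (((PySem.List.enumerate string.toList 0).map
            (fun p => (p.2.toNat : Int)
              * (PySem.Int.mod ((17 : Int) ^ (PySem.Str.len string - p.1).toNat) 256))).sum)
        256 = pvHsum string.toList % 256
    rw [PySem.Int.mod_eq_emod_of_pos (by norm_num)]
    exact pvEnumSum_hsum string.toList 0 (PySem.Str.len string) (by simp)
  rw [hA, hB]
  ring_nf
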